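-- pv_equiv track=rewrite | github.com/ADockhorn/StateDeterminizationExperiments | prediction_test_clusters.py | evaluate_top_k_predictions_remaining_game
-- ===== SOURCE A (Python) =====
-- def evaluate_top_k_predictions_remaining_game(turn, predictions, cards_per_turn):
--     correct = [False] * len(predictions)
--
--     for pred_idx, (prediction, prediction_count) in enumerate(predictions):
--
--         for turn_idx in range(turn + 1, max(cards_per_turn)+1):
--             if turn_idx in cards_per_turn:
--                 if prediction in cards_per_turn[turn_idx]:
--                     correct[pred_idx] = True
--                     break
--
--     return correct
-- ===== SOURCE B (Python) =====
-- def evaluate_top_k_predictions_remaining_game(turn, predictions, cards_per_turn):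
--     future = set()
--     for t, cards in cards_per_turn.items():
--         if t > turn:
--             future.update(cards)
--     return [p in future for p, _ in predictions]
-- ===== Notes on version B (the rewrite author's own statement) =====
-- stated objective: faster
-- what changed: B collects the union of all future turns' cards into one set in a single pass over the dict's items (no range/max scan) and answers each prediction by a single set-membership test, instead of A's per-prediction rescan of every future turn's card list.
import Mathlib
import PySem

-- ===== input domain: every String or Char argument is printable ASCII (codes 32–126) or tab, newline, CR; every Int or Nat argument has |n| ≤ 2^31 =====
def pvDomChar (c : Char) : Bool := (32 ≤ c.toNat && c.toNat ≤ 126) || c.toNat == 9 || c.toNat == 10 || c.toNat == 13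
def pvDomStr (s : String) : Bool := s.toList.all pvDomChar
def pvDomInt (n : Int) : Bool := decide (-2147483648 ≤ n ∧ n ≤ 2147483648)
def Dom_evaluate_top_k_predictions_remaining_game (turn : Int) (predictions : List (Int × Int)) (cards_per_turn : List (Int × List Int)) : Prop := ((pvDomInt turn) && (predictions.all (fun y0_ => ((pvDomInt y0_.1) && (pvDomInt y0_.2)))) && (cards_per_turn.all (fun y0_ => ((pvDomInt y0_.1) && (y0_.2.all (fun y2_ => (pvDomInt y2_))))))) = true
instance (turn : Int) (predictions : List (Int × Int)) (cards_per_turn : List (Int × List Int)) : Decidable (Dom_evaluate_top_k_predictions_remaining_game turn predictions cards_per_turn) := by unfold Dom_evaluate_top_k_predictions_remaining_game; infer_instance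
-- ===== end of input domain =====

-- One honest line: B collects all future turns' cards into one set in a single pass over the
-- dict's items and answers each prediction by one membership test, instead of A's per-prediction
-- rescan of the whole future turn range with linear list membership (objective: faster).

-- ===== PORT A =====
def evaluate_top_k_predictions_remaining_game (turn : Int) (predictions : List (Int × Int)) (cards_per_turn : List (Int × List Int)) : List Bool :=
  -- for pred_idx, (prediction, _) in enumerate(predictions): inner loop with break = .any;
  -- each slot of `correct` depends only on its own prediction, so the write-into-list loop is a map
  predictions.map (fun pred =>
    match PySem.List.max? (cards_per_turn.map Prod.fst) (fun x => x) with
    | none => false  -- Python: max() of empty dict raises ValueError; excluded by Pre_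
    | some mx =>
      (PySem.List.pyRange (turn + 1) (mx + 1) 1).any (fun turn_idx =>
        match (PySem.Dict.mk cards_per_turn).get? turn_idx with   -- `turn_idx in cards_per_turn` + lookup
        | some lst => lst.contains pred.1
        | none => false))

-- ===== PORT B =====
def evaluate_top_k_predictions_remaining_game_alt (turn : Int) (predictions : List (Int × Int)) (cards_per_turn : List (Int × List Int)) : List Bool :=
  -- future = set(); for t, cards in cards_per_turn.items(): if t > turn: future.update(cards)
  let future :=
    (PySem.Dict.mk cards_per_turn).items.foldl
      (fun future tc => if tc.1 > turn then PySem.Set.update future tc.2 else future)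
      PySem.Set.empty
  predictions.map (fun p => PySem.Set.contains future p.1)   -- [p in future for p, _ in predictions]

-- ===== PRECONDITION & SPEC =====
-- Pre_ excludes (a) exactly the inputs on which A raises ValueError (max() of an empty dict,
-- reached whenever predictions is nonempty and cards_per_turn is empty), and (b) association
-- lists with duplicate keys, which do not represent any Python dict (the parameter is a dict,
-- so its keys are distinct by construction).
def Pre_evaluate_top_k_predictions_remaining_game (turn : Int) (predictions : List (Int × Int)) (cards_per_turn : List (Int × List Int)) : Prop :=
  (predictions = [] ∨ cards_per_turn ≠ []) ∧ (cards_per_turn.map Prod.fst).Nodup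
instance (turn : Int) (predictions : List (Int × Int)) (cards_per_turn : List (Int × List Int)) : Decidable (Pre_evaluate_top_k_predictions_remaining_game turn predictions cards_per_turn) := by unfold Pre_evaluate_top_k_predictions_remaining_game; infer_instance

def pvWitness_evaluate_top_k_predictions_remaining_game : Int × (List (Int × Int)) × (List (Int × List Int)) :=
  (1, [(3, 1), (5, 2), (3, 0)], [(1, [9]), (2, [3, 4]), (4, [5])])

def Spec_evaluate_top_k_predictions_remaining_game (turn : Int) (predictions : List (Int × Int)) (cards_per_turn : List (Int × List Int)) (out : List Bool) : Prop := out = evaluate_top_k_predictions_remaining_game_alt turn predictions cards_per_turn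
instance (turn : Int) (predictions : List (Int × Int)) (cards_per_turn : List (Int × List Int)) (out : List Bool) : Decidable (Spec_evaluate_top_k_predictions_remaining_game turn predictions cards_per_turn out) := by unfold Spec_evaluate_top_k_predictions_remaining_game; infer_instance

-- ===== CLAIM (what is proved, stated in full; the proofs are below) =====
def Claim_equal_evaluate_top_k_predictions_remaining_game : Prop := ∀ (turn : Int) (predictions : List (Int × Int)) (cards_per_turn : List (Int × List Int)), Dom_evaluate_top_k_predictions_remaining_game turn predictions cards_per_turn → Pre_evaluate_top_k_predictions_remaining_game turn predictions cards_per_turn → Spec_evaluate_top_k_predictions_remaining_game turn predictions cards_per_turn (evaluate_top_k_predictions_remaining_game turn predictions cards_per_turn)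

-- ===== LEMMAS AND PROOFS =====

-- membership in the accumulated `future` set after the fold over the dict items
theorem pv_contains_future (turn x : Int) :
    ∀ (L : List (Int × List Int)) (s : PySem.Set Int),
      PySem.Set.contains
        (L.foldl (fun future tc => if tc.1 > turn then PySem.Set.update future tc.2 else future) s) x
      = (PySem.Set.contains s x || L.any (fun tc => decide (turn < tc.1) && tc.2.contains x)) := by
  intro L
  induction L with
  | nil => intro s; simp
  | cons tc L ih =>
    intro s
    by_cases h : tc.1 > turn
    · simp only [List.foldl_cons, if_pos h, ih, List.any_cons]
      simp [pysem, h, Bool.or_assoc]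
    · simp only [List.foldl_cons, if_neg h, ih, List.any_cons]
      simp [show ¬ turn < tc.1 from h]

-- A's per-prediction range scan equals one scan over the dict items
theorem pv_A_elem (turn mx x : Int) (cards : List (Int × List Int))
    (hnd : (cards.map Prod.fst).Nodup)
    (hmx : PySem.List.max? (cards.map Prod.fst) (fun y => y) = some mx) :
    ((PySem.List.pyRange (turn + 1) (mx + 1) 1).any (fun t =>
        match (PySem.Dict.mk cards).get? t with
        | some lst => lst.contains x
        | none => false))
    = (PySem.Dict.mk cards).items.any (fun tc => decide (turn < tc.1) && tc.2.contains x) := by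
  have hkeys : (PySem.Dict.mk cards).keys.Nodup := by
    simpa [PySem.Dict.keys_mk] using hnd
  rw [Bool.eq_iff_iff]
  simp only [List.any_eq_true]
  constructor
  · rintro ⟨t, ht, hm⟩
    cases hg : (PySem.Dict.mk cards).get? t with
    | none => rw [hg] at hm; simp at hm
    | some lst =>
      rw [hg] at hm
      refine ⟨(t, lst), (PySem.Dict.get?_eq_some_iff_mem_items _ _ _ hkeys).mp hg, ?_⟩
      have hrange := PySem.List.mem_pyRange_one.mp ht
      simp only [hm, Bool.and_true]
      exact decide_eq_true (by omega)
  · rintro ⟨tc, htc, hm⟩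
    rw [Bool.and_eq_true, decide_eq_true_eq] at hm
    have hle : tc.1 ≤ mx := by
      have hk : tc.1 ∈ (PySem.Dict.mk cards).keys := PySem.Dict.mem_keys_of_mem_items _ htc
      rw [PySem.Dict.keys_mk] at hk
      exact PySem.List.max?_isMax hmx _ hk
    refine ⟨tc.1, PySem.List.mem_pyRange_one.mpr ⟨by omega, by omega⟩, ?_⟩
    have hg : (PySem.Dict.mk cards).get? tc.1 = some tc.2 := by
      exact (PySem.Dict.get?_eq_some_iff_mem_items _ _ _ hkeys).mpr (by simpa using htc)
    rw [hg]; exact hm.2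

-- ===== VERDICT (by name: the statements are the Claim_ definitions above) =====
theorem evaluate_top_k_predictions_remaining_game_spec : Claim_equal_evaluate_top_k_predictions_remaining_game := by
  intro turn predictions cards _hDom hPre
  obtain ⟨hPre1, hnd⟩ := hPre
  unfold Spec_evaluate_top_k_predictions_remaining_game
  unfold evaluate_top_k_predictions_remaining_game evaluate_top_k_predictions_remaining_game_alt
  cases predictions with
  | nil => simp
  | cons p ps =>
    have hc : cards ≠ [] := by
      rcases hPre1 with h | h
      · exact absurd h (by simp)
      · exact h
    cases hmx : PySem.List.max? (cards.map Prod.fst) (fun x => x) with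
    | none =>
      exact absurd ((PySem.List.max?_eq_none_iff (cards.map Prod.fst) _).mp hmx) (by simpa using hc)
    | some mx =>
      apply List.map_congr_left
      intro pred _
      rw [pv_contains_future]
      simpa using pv_A_elem turn mx pred.1 cards hnd hmx
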